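-- pv_equiv track=rewrite | github.com/yelbakkali/yeb_app_template | shared_python/packages/FLEET/script/FCOM/PI/stab trim setting/stab trim setting.py | parse_stab_tokens
-- ===== SOURCE A (Python) =====
-- def parse_stab_tokens(parts):
--     result = []
--     i = 0
--     while i < len(parts):
--         token = parts[i]
--         if i + 1 < len(parts) and '/' in parts[i + 1]:
--             result.append(token + ' ' + parts[i + 1])
--             i += 2
--         else:
--             result.append(token)
--             i += 1
--     return result
-- ===== SOURCE B (Python) =====
-- def parse_stab_tokens(parts):
--     result = []
--     prev_consumed = False
--     for token in parts:
--         if '/' in token and result and not prev_consumed: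
--             result[-1] = result[-1] + ' ' + token
--             prev_consumed = True
--         else:
--             result.append(token)
--             prev_consumed = False
--     return result
-- ===== Notes on version B (the rewrite author's own statement) =====
-- stated objective: simpler
-- what changed: Replaced A's index-jumping while loop with a lookahead at parts[i+1] (advancing by 2 on a merge) by a single for-each pass that looks back: a slash-containing token is merged into the previous result element unless that element already absorbed one, tracked by a prev_consumed flag.
import Mathlib
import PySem

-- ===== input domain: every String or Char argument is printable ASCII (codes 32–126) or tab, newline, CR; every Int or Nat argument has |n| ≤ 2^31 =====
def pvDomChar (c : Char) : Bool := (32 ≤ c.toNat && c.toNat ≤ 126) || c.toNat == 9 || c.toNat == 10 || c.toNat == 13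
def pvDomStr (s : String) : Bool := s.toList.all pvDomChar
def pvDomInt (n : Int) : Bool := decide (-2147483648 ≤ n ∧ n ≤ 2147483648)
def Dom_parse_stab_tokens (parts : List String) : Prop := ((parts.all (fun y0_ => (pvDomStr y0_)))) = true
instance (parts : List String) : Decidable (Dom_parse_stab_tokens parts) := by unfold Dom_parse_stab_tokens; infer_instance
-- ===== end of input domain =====

-- B replaces A's index-jumping lookahead (i += 2 on a merge) by a single look-back pass
-- that appends each token and, when it contains '/', merges it into the previous element
-- unless that element was itself produced by a merge (objective: simpler decomposition).

-- ===== PORT A =====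
-- A's while loop over index i, appending to the accumulator `result`.
def parse_stab_tokens_goA (parts : List String) (i : Nat) (result : List String) :
    List String :=
  if h : i < parts.length then
    let token := parts[i]
    if hn : i + 1 < parts.length then
      if PySem.Str.isIn "/" parts[i + 1] then
        parse_stab_tokens_goA parts (i + 2) (result ++ [token ++ " " ++ parts[i + 1]])
      else
        parse_stab_tokens_goA parts (i + 1) (result ++ [token])
    else
      parse_stab_tokens_goA parts (i + 1) (result ++ [token])
  else
    result
termination_by parts.length - i

def parse_stab_tokens (parts : List String) : List String :=
  parse_stab_tokens_goA parts 0 []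

-- ===== PORT B =====
-- B's single forward pass: state = (result, prev_consumed).
def parse_stab_tokens_step (st : List String × Bool) (token : String) :
    List String × Bool :=
  if PySem.Str.isIn "/" token ∧ st.1 ≠ [] ∧ st.2 = false then
    (st.1.dropLast ++ [st.1.getLastD "" ++ " " ++ token], true)
  else
    (st.1 ++ [token], false)

def parse_stab_tokens_alt (parts : List String) : List String :=
  (parts.foldl parse_stab_tokens_step ([], false)).1

-- ===== PRECONDITION & SPEC =====
def Spec_parse_stab_tokens (parts : List String) (out : List String) : Prop := out = parse_stab_tokens_alt parts
instance (parts : List String) (out : List String) : Decidable (Spec_parse_stab_tokens parts out) := by unfold Spec_parse_stab_tokens; infer_instance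

-- ===== CLAIM (what is proved, stated in full; the proofs are below) =====
def Claim_equal_parse_stab_tokens : Prop := ∀ (parts : List String), Dom_parse_stab_tokens parts → Spec_parse_stab_tokens parts (parse_stab_tokens parts)

-- ===== LEMMAS AND PROOFS =====

-- Common specification: greedy non-overlapping pairing of each token with a following
-- slash-containing token.
def mergeSpec : List String → List String
  | [] => []
  | [a] => [a]
  | a :: b :: rest =>
    if PySem.Str.isIn "/" b then (a ++ " " ++ b) :: mergeSpec rest
    else a :: mergeSpec (b :: rest)

theorem goA_eq_mergeSpec (parts : List String) (i : Nat) (result : List String) :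
    parse_stab_tokens_goA parts i result = result ++ mergeSpec (parts.drop i) := by
  induction i, result using parse_stab_tokens_goA.induct parts with
  | case1 i result h token hn hs ih =>
    rw [parse_stab_tokens_goA]
    simp only [dif_pos h, dif_pos hn, if_pos hs]
    rw [show token = parts[i] from rfl] at ih
    rw [ih, List.drop_eq_getElem_cons h, List.drop_eq_getElem_cons hn, mergeSpec, if_pos hs]
    simp
  | case2 i result h token hn hs ih =>
    rw [parse_stab_tokens_goA]
    simp only [dif_pos h, dif_pos hn, if_neg hs]
    rw [show token = parts[i] from rfl] at ih
    rw [ih, List.drop_eq_getElem_cons h, List.drop_eq_getElem_cons hn, mergeSpec, if_neg hs]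
    simp
  | case3 i result h token hn ih =>
    rw [parse_stab_tokens_goA]
    simp only [dif_pos h, dif_neg hn]
    rw [show token = parts[i] from rfl] at ih
    rw [ih, List.drop_eq_getElem_cons h,
      List.drop_eq_nil_of_le (show parts.length ≤ i + 1 by omega)]
    simp [mergeSpec]
  | case4 i result h =>
    rw [parse_stab_tokens_goA]
    rw [List.drop_eq_nil_of_le (by omega)]
    simp [mergeSpec, h]

-- B's fold, characterised for both flag values; the two statements are mutually
-- dependent, proved together by induction on the token list.
theorem foldl_step_char (l : List String) :
    (∀ (acc : List String) (x : String),
      (l.foldl parse_stab_tokens_step (acc ++ [x], false)).1 = acc ++ mergeSpec (x :: l)) ∧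
    (∀ (acc : List String),
      (l.foldl parse_stab_tokens_step (acc, true)).1 = acc ++ mergeSpec l) := by
  induction l with
  | nil => simp [mergeSpec]
  | cons t rest ih =>
    constructor
    · intro acc x
      by_cases hs : PySem.Str.isIn "/" t
      · have hstep : parse_stab_tokens_step (acc ++ [x], false) t =
            (acc ++ [x ++ " " ++ t], true) := by
          unfold parse_stab_tokens_step
          rw [if_pos ⟨hs, by simp, rfl⟩]
          simp
        simp only [List.foldl_cons, hstep, ih.2]
        rw [mergeSpec, if_pos hs]
        simp
      · have hstep : parse_stab_tokens_step (acc ++ [x], false) t =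
            ((acc ++ [x]) ++ [t], false) := by
          unfold parse_stab_tokens_step
          rw [if_neg (fun hc => hs hc.1)]
        simp only [List.foldl_cons, hstep, ih.1]
        rw [mergeSpec, if_neg hs]
        simp
    · intro acc
      have hstep : parse_stab_tokens_step (acc, true) t = (acc ++ [t], false) := by
        unfold parse_stab_tokens_step
        rw [if_neg (fun hc => Bool.noConfusion hc.2.2)]
      simp only [List.foldl_cons, hstep, ih.1]

theorem alt_eq_mergeSpec (parts : List String) :
    parse_stab_tokens_alt parts = mergeSpec parts := by
  cases parts with
  | nil => rfl
  | cons a rest =>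
    unfold parse_stab_tokens_alt
    have hstep : parse_stab_tokens_step ([], false) a = ([] ++ [a], false) := by
      unfold parse_stab_tokens_step
      rw [if_neg (fun hc => hc.2.1 rfl)]
    simp only [List.foldl_cons, hstep, (foldl_step_char rest).1]
    rfl

-- ===== VERDICT (by name: the statement is the Claim_ definition above) =====
theorem parse_stab_tokens_spec : Claim_equal_parse_stab_tokens := by
  intro parts _
  unfold Spec_parse_stab_tokens parse_stab_tokens
  rw [goA_eq_mergeSpec, alt_eq_mergeSpec]
  simp
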